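-- pv_equiv track=rewrite | github.com/farzin-f/binary_search_tree | test_trees.py | wordGenerator
-- ===== SOURCE A (Python) =====
-- def wordGenerator(splitText):
--     for fragment in splitText:
--         word = ''
--         idx = 0
--         while idx < len(fragment):
--             if fragment[idx].isalpha():
--                 word += fragment[idx].lower()
--                 idx += 1
--             elif fragment[idx] == "-":
--                 if idx+1 < len(fragment) and fragment[idx+1] == "-":
--                     #print (word)
--                     yield word
--                     word = ''
--                     idx += 2
--                 else:
--                     word += fragment[idx].lower()
--                     idx +=1
--             else:
--                 idx += 1
--
--         yield word
-- ===== SOURCE B (Python) =====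
-- def wordGenerator(splitText):
--     for fragment in splitText:
--         for piece in fragment.split('--'):
--             yield ''.join(c.lower() for c in piece if c.isalpha() or c == '-')
-- ===== Notes on version B (the rewrite author's own statement) =====
-- stated objective: idiomatic
-- what changed: Replaces A's manual index-based while loop with per-character state (idx jumps, word accumulator, mid-loop yields) by splitting each fragment on '--' with str.split and cleaning each piece with a single filter/lower comprehension.
import Mathlib
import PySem

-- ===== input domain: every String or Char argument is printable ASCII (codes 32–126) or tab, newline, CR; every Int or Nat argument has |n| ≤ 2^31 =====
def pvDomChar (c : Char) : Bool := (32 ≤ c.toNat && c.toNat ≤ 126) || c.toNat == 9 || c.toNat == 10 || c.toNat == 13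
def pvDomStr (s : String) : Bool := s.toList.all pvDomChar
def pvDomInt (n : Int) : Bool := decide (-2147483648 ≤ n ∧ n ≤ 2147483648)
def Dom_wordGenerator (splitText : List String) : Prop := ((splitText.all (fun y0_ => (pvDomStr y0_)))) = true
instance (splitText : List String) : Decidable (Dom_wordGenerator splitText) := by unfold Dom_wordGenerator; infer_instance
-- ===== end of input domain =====

-- B replaces A's index-based character scan with str.split('--') plus a per-piece filter/lower pass (objective: idiomatic).
-- ===== PORT A =====
-- inner while loop of A; `word` is the accumulated string, kept as List Char (String.mk at each yield)
def pvLoopA (cs : List Char) (idx : Nat) (word : List Char) : List String :=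
  if h : idx < cs.length then
    if PySem.Chars.isalpha cs[idx] then
      pvLoopA cs (idx + 1) (word ++ [PySem.Chars.lowerChar cs[idx]])
    else if cs[idx] = '-' then
      if h2 : idx + 1 < cs.length then
        if cs[idx + 1] = '-' then
          String.mk word :: pvLoopA cs (idx + 2) []
        else
          pvLoopA cs (idx + 1) (word ++ [PySem.Chars.lowerChar cs[idx]])
      else
        pvLoopA cs (idx + 1) (word ++ [PySem.Chars.lowerChar cs[idx]])
    else
      pvLoopA cs (idx + 1) word
  else
    [String.mk word]
termination_by cs.length - idx

def wordGenerator (splitText : List String) : List String :=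
  splitText.flatMap (fun fragment => pvLoopA fragment.toList 0 [])

-- ===== PORT B =====
def pvKeep (c : Char) : Bool := PySem.Chars.isalpha c || c = '-'

-- ''.join(c.lower() for c in piece if c.isalpha() or c == '-')
def pvClean (piece : List Char) : List Char := (piece.filter pvKeep).map PySem.Chars.lowerChar

def wordGenerator_alt (splitText : List String) : List String :=
  splitText.flatMap (fun fragment =>
    (PySem.Chars.splitOn fragment.toList ['-', '-']).map (fun piece => String.mk (pvClean piece)))

-- ===== PRECONDITION & SPEC =====
def Spec_wordGenerator (splitText : List String) (out : List String) : Prop := out = wordGenerator_alt splitText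
instance (splitText : List String) (out : List String) : Decidable (Spec_wordGenerator splitText out) := by unfold Spec_wordGenerator; infer_instance

-- ===== CLAIM (what is proved, stated in full; the proofs are below) =====
def Claim_equal_wordGenerator : Prop := ∀ (splitText : List String), Dom_wordGenerator splitText → Spec_wordGenerator splitText (wordGenerator splitText)

-- ===== LEMMAS AND PROOFS =====

-- structural (list-shaped) version of A's while loop, over the unprocessed suffix
def pvLoopB : List Char → List Char → List (List Char)
  | [], word => [word]
  | c :: rest, word =>
    if PySem.Chars.isalpha c then pvLoopB rest (word ++ [PySem.Chars.lowerChar c])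
    else if c = '-' then
      if rest.head? = some '-' then word :: pvLoopB rest.tail []
      else pvLoopB rest (word ++ [PySem.Chars.lowerChar c])
    else pvLoopB rest word
termination_by cs _ => cs.length
decreasing_by all_goals simp [List.length_tail]

-- prepend w to the head piece
def pvModHead (w : List Char) : List (List Char) → List (List Char)
  | [] => [w]
  | p :: ps => (w ++ p) :: ps

theorem pvModHead_modHead (w v : List Char) (l : List (List Char)) :
    pvModHead w (pvModHead v l) = pvModHead (w ++ v) l := by
  cases l <;> simp [pvModHead]

theorem pvGo_acc (fuel : Nat) : ∀ (l cur : List Char) (acc : List (List Char)),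
    PySem.Chars.splitOn.go ['-', '-'] fuel l cur acc
      = acc.reverse ++ PySem.Chars.splitOn.go ['-', '-'] fuel l cur [] := by
  induction fuel with
  | zero => intro l cur acc; simp [PySem.Chars.splitOn.go]
  | succ fuel ih =>
    intro l cur acc
    cases l with
    | nil => simp [PySem.Chars.splitOn.go]
    | cons c rest =>
      simp only [PySem.Chars.splitOn.go]
      split
      · rw [ih _ _ (cur.reverse :: acc), ih _ _ [cur.reverse]]
        simp
      · exact ih _ _ acc

theorem pvGo_fuel : ∀ (k : Nat) (l : List Char), l.length ≤ k →
    ∀ (cur : List Char) (acc : List (List Char)) (f n : Nat), l.length ≤ f → l.length ≤ n →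
    PySem.Chars.splitOn.go ['-', '-'] f l cur acc = PySem.Chars.splitOn.go ['-', '-'] n l cur acc := by
  intro k
  induction k with
  | zero =>
    intro l hl cur acc f n _ _
    have : l = [] := List.eq_nil_of_length_eq_zero (Nat.le_zero.mp hl)
    subst this
    cases f <;> cases n <;> simp [PySem.Chars.splitOn.go]
  | succ k ih =>
    intro l hl cur acc f n hf hn
    cases l with
    | nil => cases f <;> cases n <;> simp [PySem.Chars.splitOn.go]
    | cons c rest =>
      simp only [List.length_cons] at hl hf hn
      obtain ⟨f', rfl⟩ : ∃ f', f = f' + 1 := ⟨f - 1, by omega⟩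
      obtain ⟨n', rfl⟩ : ∃ n', n = n' + 1 := ⟨n - 1, by omega⟩
      simp only [PySem.Chars.splitOn.go]
      split
      · apply ih
        · simp; omega
        · simp; omega
        · simp; omega
      · exact ih rest (by omega) _ _ _ _ (by omega) (by omega)

theorem pvGo_cur (fuel : Nat) : ∀ (l cur : List Char),
    PySem.Chars.splitOn.go ['-', '-'] fuel l cur []
      = pvModHead cur.reverse (PySem.Chars.splitOn.go ['-', '-'] fuel l [] []) := by
  induction fuel with
  | zero => intro l cur; simp [PySem.Chars.splitOn.go, pvModHead]
  | succ fuel ih =>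
    intro l cur
    cases l with
    | nil => simp [PySem.Chars.splitOn.go, pvModHead]
    | cons c rest =>
      simp only [PySem.Chars.splitOn.go]
      split
      · rw [pvGo_acc _ _ _ [cur.reverse], pvGo_acc _ _ _ [List.reverse []]]
        simp [pvModHead]
      · rw [ih rest (c :: cur), ih rest [c]]
        rw [pvModHead_modHead]
        simp

theorem pvGo_ne_nil (fuel : Nat) : ∀ (l cur : List Char) (acc : List (List Char)),
    PySem.Chars.splitOn.go ['-', '-'] fuel l cur acc ≠ [] := by
  induction fuel with
  | zero => intro l cur acc; simp [PySem.Chars.splitOn.go]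
  | succ fuel ih =>
    intro l cur acc
    cases l with
    | nil => simp [PySem.Chars.splitOn.go]
    | cons c rest =>
      simp only [PySem.Chars.splitOn.go]
      split
      · exact ih _ _ _
      · exact ih _ _ _

theorem pvSplitOn_ne_nil (cs : List Char) : PySem.Chars.splitOn cs ['-', '-'] ≠ [] := by
  unfold PySem.Chars.splitOn
  exact pvGo_ne_nil _ _ _ _

theorem pvSplitOn_nil : PySem.Chars.splitOn [] ['-', '-'] = [[]] := by decide

theorem pvSplitOn_dd (rest : List Char) :
    PySem.Chars.splitOn ('-' :: '-' :: rest) ['-', '-'] = [] :: PySem.Chars.splitOn rest ['-', '-'] := by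
  unfold PySem.Chars.splitOn
  simp only [PySem.Chars.splitOn.go, List.length_cons]
  rw [if_pos (by simp [List.isPrefixOf])]
  simp only [List.drop_succ_cons, List.length_nil, List.drop_zero, List.reverse_nil]
  rw [pvGo_acc _ _ _ [[]]]
  rw [pvGo_fuel (rest.length + 2) rest (by omega) [] [] _ (rest.length + 1) (by omega) (by omega)]
  simp

theorem pvSplitOn_cons (c : Char) (rest : List Char)
    (hpre : (['-', '-'] : List Char).isPrefixOf (c :: rest) = false) :
    PySem.Chars.splitOn (c :: rest) ['-', '-'] = pvModHead [c] (PySem.Chars.splitOn rest ['-', '-']) := by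
  unfold PySem.Chars.splitOn
  simp only [PySem.Chars.splitOn.go, List.length_cons]
  rw [if_neg (by simp [hpre])]
  rw [pvGo_cur]
  rfl

theorem pvClean_keep (c : Char) (p : List Char) (h : pvKeep c = true) :
    pvClean (c :: p) = PySem.Chars.lowerChar c :: pvClean p := by
  simp [pvClean, h]

theorem pvClean_drop (c : Char) (p : List Char) (h : pvKeep c = false) :
    pvClean (c :: p) = pvClean p := by
  simp [pvClean, h]

theorem pvLoopB_eq (cs word : List Char) :
    pvLoopB cs word = pvModHead word ((PySem.Chars.splitOn cs ['-', '-']).map pvClean) := by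
  induction cs, word using pvLoopB.induct with
  | case1 word =>
    simp [pvLoopB, pvSplitOn_nil, pvClean, pvModHead]
  | case2 c rest word halpha ih =>
    have hc : c ≠ '-' := by
      intro h; subst h; exact absurd halpha (by decide)
    rw [pvSplitOn_cons c rest (by simp [List.isPrefixOf, Ne.symm hc])]
    obtain ⟨p, ps, hps⟩ : ∃ p ps, PySem.Chars.splitOn rest ['-', '-'] = p :: ps := by
      cases h : PySem.Chars.splitOn rest ['-', '-'] with
      | nil => exact absurd h (pvSplitOn_ne_nil rest)
      | cons p ps => exact ⟨p, ps, rfl⟩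
    rw [pvLoopB, if_pos halpha, ih, hps]
    simp [pvModHead, pvClean_keep c p (by simp [pvKeep, halpha])]
  | case3 rest word hhead halpha ih =>
    obtain ⟨rest', rfl⟩ : ∃ rest', rest = '-' :: rest' := by
      cases rest with
      | nil => simp at hhead
      | cons d rest' => simp at hhead; exact ⟨rest', by rw [hhead]⟩
    simp only [List.tail_cons] at ih
    rw [pvSplitOn_dd rest']
    rw [pvLoopB, if_neg halpha, if_pos rfl, if_pos hhead, List.tail_cons, ih]
    obtain ⟨p, ps, hps⟩ : ∃ p ps, PySem.Chars.splitOn rest' ['-', '-'] = p :: ps := by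
      cases h : PySem.Chars.splitOn rest' ['-', '-'] with
      | nil => exact absurd h (pvSplitOn_ne_nil rest')
      | cons p ps => exact ⟨p, ps, rfl⟩
    rw [hps]
    simp [pvModHead, pvClean]
  | case4 rest word hhead halpha ih =>
    have hpre : (['-', '-'] : List Char).isPrefixOf ('-' :: rest) = false := by
      cases rest with
      | nil => simp [List.isPrefixOf]
      | cons d rest' =>
        have hd : d ≠ '-' := by intro h; subst h; simp at hhead
        simp [List.isPrefixOf, Ne.symm hd]
    rw [pvSplitOn_cons _ rest hpre]
    obtain ⟨p, ps, hps⟩ : ∃ p ps, PySem.Chars.splitOn rest ['-', '-'] = p :: ps := by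
      cases h : PySem.Chars.splitOn rest ['-', '-'] with
      | nil => exact absurd h (pvSplitOn_ne_nil rest)
      | cons p ps => exact ⟨p, ps, rfl⟩
    rw [pvLoopB, if_neg halpha, if_pos rfl, if_neg hhead, ih, hps]
    have hlow : PySem.Chars.lowerChar '-' = '-' := by decide
    simp [pvModHead, pvClean_keep '-' p (by simp [pvKeep]), hlow]
  | case5 c rest word halpha hc ih =>
    have hpre : (['-', '-'] : List Char).isPrefixOf (c :: rest) = false := by
      simp [List.isPrefixOf, Ne.symm hc]
    rw [pvSplitOn_cons c rest hpre]
    obtain ⟨p, ps, hps⟩ : ∃ p ps, PySem.Chars.splitOn rest ['-', '-'] = p :: ps := by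
      cases h : PySem.Chars.splitOn rest ['-', '-'] with
      | nil => exact absurd h (pvSplitOn_ne_nil rest)
      | cons p ps => exact ⟨p, ps, rfl⟩
    rw [pvLoopB, if_neg halpha, if_neg hc, ih, hps]
    simp [pvModHead, pvClean_drop c p (by simp [pvKeep, halpha, hc])]

theorem pvLoopA_eq_loopB (cs : List Char) (idx : Nat) (word : List Char) :
    pvLoopA cs idx word = (pvLoopB (cs.drop idx) word).map String.mk := by
  have hna : PySem.Chars.isalpha '-' = false := by decide
  induction idx, word using pvLoopA.induct cs with
  | case1 idx word h halpha ih =>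
    rw [pvLoopA, dif_pos h, if_pos halpha, ih]
    rw [show cs.drop idx = cs[idx] :: cs.drop (idx + 1) from (List.getElem_cons_drop h).symm]
    rw [pvLoopB, if_pos halpha]
  | case2 idx word h halpha hdash h2 hdd ih =>
    rw [pvLoopA, dif_pos h, if_neg halpha, if_pos hdash, dif_pos h2, if_pos hdd, ih]
    rw [show cs.drop idx = cs[idx] :: cs.drop (idx + 1) from (List.getElem_cons_drop h).symm]
    rw [show cs.drop (idx + 1) = cs[idx + 1] :: cs.drop (idx + 2) from (List.getElem_cons_drop h2).symm]
    rw [pvLoopB, if_neg halpha, if_pos hdash, if_pos (by simp [hdd]), List.tail_cons, List.map_cons]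
  | case3 idx word h halpha hdash h2 hdd ih =>
    rw [pvLoopA, dif_pos h, if_neg halpha, if_pos hdash, dif_pos h2, if_neg hdd, ih]
    rw [show cs.drop idx = cs[idx] :: cs.drop (idx + 1) from (List.getElem_cons_drop h).symm]
    rw [pvLoopB, if_neg halpha, if_pos hdash]
    rw [if_neg (by
      have hh : (cs.drop (idx + 1)).head? = some cs[idx + 1] := by
        rw [show cs.drop (idx + 1) = cs[idx + 1] :: cs.drop (idx + 2) from (List.getElem_cons_drop h2).symm]
        simp
      simp [hh, hdd])]
  | case4 idx word h halpha hdash h2 ih =>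
    have hnil : cs.drop (idx + 1) = [] := List.drop_eq_nil_of_le (by omega)
    rw [pvLoopA, dif_pos h, if_neg halpha, if_pos hdash, dif_neg h2, ih]
    rw [show cs.drop idx = cs[idx] :: cs.drop (idx + 1) from (List.getElem_cons_drop h).symm]
    rw [pvLoopB, if_neg halpha, if_pos hdash, if_neg (by rw [hnil]; simp)]
  | case5 idx word h halpha hdash ih =>
    rw [pvLoopA, dif_pos h, if_neg halpha, if_neg hdash, ih]
    rw [show cs.drop idx = cs[idx] :: cs.drop (idx + 1) from (List.getElem_cons_drop h).symm]
    rw [pvLoopB, if_neg halpha, if_neg hdash]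
  | case6 idx word h =>
    rw [pvLoopA, dif_neg h]
    rw [List.drop_eq_nil_of_le (by omega)]
    simp [pvLoopB]

theorem pvFragment_eq (cs : List Char) :
    pvLoopA cs 0 [] = (PySem.Chars.splitOn cs ['-', '-']).map (fun piece => String.mk (pvClean piece)) := by
  rw [pvLoopA_eq_loopB cs 0 [], List.drop_zero, pvLoopB_eq cs []]
  obtain ⟨p, ps, hps⟩ : ∃ p ps, PySem.Chars.splitOn cs ['-', '-'] = p :: ps := by
    cases h : PySem.Chars.splitOn cs ['-', '-'] with
    | nil => exact absurd h (pvSplitOn_ne_nil cs)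
    | cons p ps => exact ⟨p, ps, rfl⟩
  rw [hps]
  simp [pvModHead]

-- ===== VERDICT (by name: the statement is the Claim_ definition above) =====
theorem wordGenerator_spec : Claim_equal_wordGenerator := by
  intro splitText _
  unfold Spec_wordGenerator wordGenerator wordGenerator_alt
  simp [pvFragment_eq]
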